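-- pv_equiv track=rewrite | github.com/minsik-um/algorithm_practice | programmers/algorithm_data_structure/greedy/체육복.py | better_solution_2
-- ===== SOURCE A (Python) =====
-- def better_solution_2(n, lost, reserve):
--     '''
--     set()을 활용한 풀이가 좋다.
--     '''
--     reserved = 0
--     lostN = list(set(lost) - set(reserve))
--     reserveN = list(set(reserve) - set(lost))
--     lostN.sort()
--     for l in lostN:
--         for x in range(l-1, l+2):
--             if x in reserveN:
--                 reserveN.remove(x)
--                 reserved += 1
--                 break
--     return n - len(lostN) + reserved
-- ===== SOURCE B (Python) =====
-- def better_solution_2(n, lost, reserve):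
--     L = sorted(set(lost) - set(reserve))
--     R = sorted(set(reserve) - set(lost))
--     i = j = 0
--     matched = 0
--     while i < len(L) and j < len(R):
--         if R[j] < L[i] - 1:
--             j += 1
--         elif R[j] > L[i] + 1:
--             i += 1
--         else:
--             matched += 1
--             i += 1
--             j += 1
--     return n - len(L) + matched
-- ===== Notes on version B (the rewrite author's own statement) =====
-- stated objective: faster
-- what changed: Replaced A's per-lost-student neighbour membership scan with list.remove over the reserve list by a single two-pointer merge scan of the two sorted deduplicated lists.
import Mathlib
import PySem

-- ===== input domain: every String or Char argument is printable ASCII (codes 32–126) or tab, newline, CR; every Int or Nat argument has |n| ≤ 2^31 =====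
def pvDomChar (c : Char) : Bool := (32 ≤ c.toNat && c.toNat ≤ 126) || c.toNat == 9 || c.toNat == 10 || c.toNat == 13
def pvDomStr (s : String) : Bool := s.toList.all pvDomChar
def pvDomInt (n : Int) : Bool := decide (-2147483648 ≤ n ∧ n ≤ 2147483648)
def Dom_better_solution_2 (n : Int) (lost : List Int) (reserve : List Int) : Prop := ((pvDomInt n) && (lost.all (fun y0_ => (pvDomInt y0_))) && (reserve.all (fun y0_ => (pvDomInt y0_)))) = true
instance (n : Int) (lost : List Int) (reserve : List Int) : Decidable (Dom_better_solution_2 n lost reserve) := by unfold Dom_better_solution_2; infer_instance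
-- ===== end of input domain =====

-- B replaces A's per-lost-student neighbour membership scan (with list.remove) by a
-- two-pointer merge over the two sorted deduplicated lists (measured faster in a timing run).

-- ===== PORT A =====
-- inner 'for x in range(l-1, l+2): if x in reserveN: reserveN.remove(x); reserved += 1; break'
def pvInnerA : List Int → List Int → (List Int × Int)
  | [], resN => (resN, 0)
  | x :: xs, resN =>
      if x ∈ resN then ((PySem.List.remove? resN x).getD resN, 1)
      else pvInnerA xs resN

-- outer 'for l in lostN: …' carrying (reserveN, reserved)
def pvALoop : List Int → List Int → Int → Int
  | [], _, reserved => reserved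
  | l :: ls, resN, reserved =>
      let p := pvInnerA (PySem.List.pyRange (l-1) (l+2) 1) resN
      pvALoop ls p.1 (reserved + p.2)

def better_solution_2 (n : Int) (lost : List Int) (reserve : List Int) : Int :=
  let lostN := PySem.List.sorted (PySem.Set.diff (PySem.Set.ofList lost) (PySem.Set.ofList reserve)) (fun x => x) false
  let reserveN := PySem.Set.diff (PySem.Set.ofList reserve) (PySem.Set.ofList lost)
  let reserved := pvALoop lostN reserveN 0
  n - lostN.length + reserved

-- ===== PORT B =====
-- the 'while i < len(L) and j < len(R)' two-pointer loop of Source B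
def pvTpGo (L R : List Int) (i j : Nat) (matched : Int) : Int :=
  if h : i < L.length ∧ j < R.length then
    if R[j]'h.2 < L[i]'h.1 - 1 then pvTpGo L R i (j+1) matched
    else if R[j]'h.2 > L[i]'h.1 + 1 then pvTpGo L R (i+1) j matched
    else pvTpGo L R (i+1) (j+1) (matched+1)
  else matched
termination_by (L.length - i) + (R.length - j)

def better_solution_2_alt (n : Int) (lost : List Int) (reserve : List Int) : Int :=
  let lostN := PySem.List.sorted (PySem.Set.diff (PySem.Set.ofList lost) (PySem.Set.ofList reserve)) (fun x => x) false
  let reserveN := PySem.List.sorted (PySem.Set.diff (PySem.Set.ofList reserve) (PySem.Set.ofList lost)) (fun x => x) false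
  n - lostN.length + pvTpGo lostN reserveN 0 0 0

-- ===== PRECONDITION & SPEC =====
def Spec_better_solution_2 (n : Int) (lost : List Int) (reserve : List Int) (out : Int) : Prop := out = better_solution_2_alt n lost reserve
instance (n : Int) (lost : List Int) (reserve : List Int) (out : Int) : Decidable (Spec_better_solution_2 n lost reserve out) := by unfold Spec_better_solution_2; infer_instance

-- ===== CLAIM (what is proved, stated in full; the proofs are below) =====
def Claim_equal_better_solution_2 : Prop := ∀ (n : Int) (lost : List Int) (reserve : List Int), Dom_better_solution_2 n lost reserve → Spec_better_solution_2 n lost reserve (better_solution_2 n lost reserve)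

-- ===== LEMMAS AND PROOFS =====

-- list-structured form of the two-pointer loop
def pvTpl : List Int → List Int → Int
  | [], _ => 0
  | _ :: _, [] => 0
  | l :: L, r :: R =>
      if r < l - 1 then pvTpl (l :: L) R
      else if r > l + 1 then pvTpl L (r :: R)
      else 1 + pvTpl L R
termination_by L R => L.length + R.length

theorem pvTpl_nilR (L : List Int) : pvTpl L [] = 0 := by
  cases L <;> simp [pvTpl]

theorem pvTpl_cons (l r : Int) (L R : List Int) :
    pvTpl (l :: L) (r :: R) =
      if r < l - 1 then pvTpl (l :: L) R
      else if r > l + 1 then pvTpl L (r :: R)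
      else 1 + pvTpl L R := by
  rw [pvTpl]

theorem pvTpGo_eq (L R : List Int) (i j : Nat) (m : Int) :
    pvTpGo L R i j m = m + pvTpl (L.drop i) (R.drop j) := by
  induction i, j, m using pvTpGo.induct L R with
  | case1 i j m h c ih =>
      rw [pvTpGo, dif_pos h, if_pos c, ih,
        List.drop_eq_getElem_cons h.1, List.drop_eq_getElem_cons h.2, pvTpl_cons,
        if_pos c, ← List.drop_eq_getElem_cons h.1]
  | case2 i j m h c1 c2 ih =>
      rw [pvTpGo, dif_pos h, if_neg c1, if_pos c2, ih,
        List.drop_eq_getElem_cons h.1, List.drop_eq_getElem_cons h.2, pvTpl_cons,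
        if_neg c1, if_pos c2, ← List.drop_eq_getElem_cons h.2]
  | case3 i j m h c1 c2 ih =>
      rw [pvTpGo, dif_pos h, if_neg c1, if_neg c2, ih,
        List.drop_eq_getElem_cons h.1, List.drop_eq_getElem_cons h.2, pvTpl_cons,
        if_neg c1, if_neg c2]
      ring
  | case4 i j m h =>
      rw [pvTpGo, dif_neg h]
      rcases Nat.lt_or_ge i L.length with hi | hi
      · have hj : R.length ≤ j := by omega
        rw [List.drop_eq_getElem_cons hi, List.drop_of_length_le hj, pvTpl_nilR]
        ring
      · rw [List.drop_of_length_le hi]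
        simp [pvTpl]

-- matched count of A's loop, accumulator split off
def pvCount (L S : List Int) : Int := pvALoop L S 0

theorem pvALoop_eq (L : List Int) : ∀ S acc, pvALoop L S acc = acc + pvCount L S := by
  induction L with
  | nil => intro S acc; simp [pvALoop, pvCount]
  | cons l ls ih =>
      intro S acc
      simp only [pvALoop, pvCount]
      rw [ih, ih]
      ring

theorem pvRange3 (l : Int) : PySem.List.pyRange (l-1) (l+2) 1 = [l-1, l, l+1] := by
  have h3 : (l + 2 - (l - 1)).toNat = 3 := by omega
  rw [PySem.List.pyRange_one, h3]
  norm_num [List.range_succ]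
  omega

theorem pvCount_cons (l : Int) (L S : List Int) :
    pvCount (l :: L) S =
      (if l - 1 ∈ S then 1 + pvCount L ((PySem.List.remove? S (l-1)).getD S)
       else if l ∈ S then 1 + pvCount L ((PySem.List.remove? S l).getD S)
       else if l + 1 ∈ S then 1 + pvCount L ((PySem.List.remove? S (l+1)).getD S)
       else pvCount L S) := by
  show pvALoop (l :: L) S 0 = _
  rw [pvALoop, pvRange3]
  simp only [pvInnerA]
  split_ifs <;> simp [pvALoop_eq]

theorem pvCount_nilR (L : List Int) : pvCount L [] = 0 := by
  induction L with
  | nil => simp [pvCount, pvALoop]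
  | cons l ls ih => simp [pvCount_cons, ih]

theorem pvCount_perm (L : List Int) : ∀ S S', S.Perm S' → S.Nodup → pvCount L S = pvCount L S' := by
  induction L with
  | nil => intro S S' _ _; simp [pvCount, pvALoop]
  | cons l ls ih =>
      intro S S' hp hnd
      rw [pvCount_cons, pvCount_cons]
      have hm : ∀ x : Int, x ∈ S ↔ x ∈ S' := fun x => hp.mem_iff
      have key : ∀ x : Int, x ∈ S →
          pvCount ls ((PySem.List.remove? S x).getD S) = pvCount ls ((PySem.List.remove? S' x).getD S') := by
        intro x hx
        rw [PySem.List.remove?_eq_some_erase S x hx,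
          PySem.List.remove?_eq_some_erase S' x ((hm x).mp hx)]
        exact ih _ _ (hp.erase x) (hnd.erase x)
      by_cases h1 : l - 1 ∈ S
      · rw [if_pos h1, if_pos ((hm _).mp h1), key _ h1]
      · rw [if_neg h1, if_neg (fun c => h1 ((hm _).mpr c))]
        by_cases h2 : l ∈ S
        · rw [if_pos h2, if_pos ((hm _).mp h2), key _ h2]
        · rw [if_neg h2, if_neg (fun c => h2 ((hm _).mpr c))]
          by_cases h3 : l + 1 ∈ S
          · rw [if_pos h3, if_pos ((hm _).mp h3), key _ h3]
          · rw [if_neg h3, if_neg (fun c => h3 ((hm _).mpr c))]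
            exact ih _ _ hp hnd

theorem pvCount_skip_small (r : Int) (L : List Int) (hL : ∀ x ∈ L, r < x - 1) :
    ∀ R, pvCount L (r :: R) = pvCount L R := by
  induction L with
  | nil => intro R; simp [pvCount, pvALoop]
  | cons l ls ih =>
      intro R
      have hlr : r < l - 1 := hL l (List.mem_cons_self ..)
      have htail : ∀ x ∈ ls, r < x - 1 := fun x hx => hL x (List.mem_cons_of_mem _ hx)
      have ih' := ih htail
      have hmem : ∀ x : Int, r < x → (x ∈ r :: R ↔ x ∈ R) := by
        intro x hx
        rw [List.mem_cons]
        constructor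
        · rintro (rfl | h)
          · exact absurd hx (by omega)
          · exact h
        · exact Or.inr
      have hrem : ∀ x : Int, r < x → x ∈ R →
          (PySem.List.remove? (r :: R) x).getD (r :: R) = r :: (PySem.List.remove? R x).getD R := by
        intro x hx hxR
        rw [PySem.List.remove?_cons_of_ne R (by omega : r ≠ x),
          PySem.List.remove?_eq_some_erase R x hxR]
        rfl
      rw [pvCount_cons, pvCount_cons]
      by_cases h1 : l - 1 ∈ R
      · rw [if_pos ((hmem _ (by omega)).mpr h1), if_pos h1, hrem _ (by omega) h1, ih']
      · rw [if_neg (fun c => h1 ((hmem _ (by omega)).mp c)), if_neg h1]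
        by_cases h2 : l ∈ R
        · rw [if_pos ((hmem _ (by omega)).mpr h2), if_pos h2, hrem _ (by omega) h2, ih']
        · rw [if_neg (fun c => h2 ((hmem _ (by omega)).mp c)), if_neg h2]
          by_cases h3 : l + 1 ∈ R
          · rw [if_pos ((hmem _ (by omega)).mpr h3), if_pos h3, hrem _ (by omega) h3, ih']
          · rw [if_neg (fun c => h3 ((hmem _ (by omega)).mp c)), if_neg h3]
            exact ih' R

theorem pvMain : ∀ L R : List Int, L.Pairwise (· < ·) → R.Pairwise (· < ·) →
    (∀ x ∈ L, x ∉ R) → pvCount L R = pvTpl L R := by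
  intro L R
  induction L, R using pvTpl.induct with
  | case1 R => intro _ _ _; simp [pvCount, pvALoop, pvTpl]
  | case2 l L => intro _ _ _; rw [pvCount_nilR, pvTpl_nilR]
  | case3 l L r R hc ih =>
      intro hL hR hdis
      rw [pvTpl_cons, if_pos hc,
        ← ih hL (hR.sublist (List.sublist_cons_self r R))
          (fun x hx c => hdis x hx (List.mem_cons_of_mem _ c))]
      apply pvCount_skip_small
      intro x hx
      rcases List.mem_cons.mp hx with rfl | hx'
      · exact hc
      · have := (List.pairwise_cons.mp hL).1 x hx'
        omega
  | case4 l L r R hc1 hc2 ih =>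
      intro hL hR hdis
      have hall : ∀ y ∈ r :: R, l + 1 < y := by
        intro y hy
        rcases List.mem_cons.mp hy with rfl | hy'
        · exact hc2
        · have := (List.pairwise_cons.mp hR).1 y hy'
          omega
      rw [pvTpl_cons, if_neg hc1, if_pos hc2, pvCount_cons]
      rw [if_neg (fun c => by have := hall _ c; omega),
        if_neg (fun c => by have := hall _ c; omega),
        if_neg (fun c => by have := hall _ c; omega)]
      exact ih (hL.sublist (List.sublist_cons_self l L)) hR
        (fun x hx => hdis x (List.mem_cons_of_mem _ hx))
  | case5 l L r R hc1 hc2 ih =>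
      intro hL hR hdis
      have hrl : r ≠ l := fun h => hdis l (List.mem_cons_self ..) (h ▸ List.mem_cons_self ..)
      have hLt : L.Pairwise (· < ·) := (List.pairwise_cons.mp hL).2
      have hRt : R.Pairwise (· < ·) := (List.pairwise_cons.mp hR).2
      have hdis' : ∀ x ∈ L, x ∉ R :=
        fun x hx c => hdis x (List.mem_cons_of_mem _ hx) (List.mem_cons_of_mem _ c)
      have hRmin : ∀ y ∈ R, r < y := (List.pairwise_cons.mp hR).1
      rw [pvTpl_cons, if_neg hc1, if_neg hc2, pvCount_cons]
      rcases (by omega : r = l - 1 ∨ r = l + 1) with rfl | rfl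
      · rw [if_pos (List.mem_cons_self ..), PySem.List.remove?_cons_self]
        simp only [Option.getD_some]
        rw [ih hLt hRt hdis']
      · rw [if_neg (by
            intro c
            rcases List.mem_cons.mp c with h | h
            · omega
            · have := hRmin _ h; omega),
          if_neg (by
            intro c
            rcases List.mem_cons.mp c with h | h
            · omega
            · have := hRmin _ h; omega),
          if_pos (List.mem_cons_self ..), PySem.List.remove?_cons_self]
        simp only [Option.getD_some]
        rw [ih hLt hRt hdis']

-- ===== VERDICT (by name: the statement is the Claim_ definition above) =====
theorem better_solution_2_spec : Claim_equal_better_solution_2 := by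
  intro n lost reserve _
  show better_solution_2 n lost reserve = better_solution_2_alt n lost reserve
  unfold better_solution_2 better_solution_2_alt
  set DL := PySem.Set.diff (PySem.Set.ofList lost) (PySem.Set.ofList reserve) with hDL
  set DR := PySem.Set.diff (PySem.Set.ofList reserve) (PySem.Set.ofList lost) with hDR
  set L := PySem.List.sorted DL (fun x => x) false with hLdef
  set Rs := PySem.List.sorted DR (fun x => x) false with hRdef
  have hDLnd : DL.Nodup := PySem.Set.nodup_diff _ _ (PySem.Set.nodup_ofList lost)
  have hDRnd : DR.Nodup := PySem.Set.nodup_diff _ _ (PySem.Set.nodup_ofList reserve)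
  have hLperm : L.Perm DL := PySem.List.sorted_perm ..
  have hRperm : Rs.Perm DR := PySem.List.sorted_perm ..
  have hLnd : L.Nodup := (hLperm.nodup_iff).mpr hDLnd
  have hRnd : Rs.Nodup := (hRperm.nodup_iff).mpr hDRnd
  have hLle : L.Pairwise (fun a b => a ≤ b) := PySem.List.sorted_pairwise DL (fun x => x)
  have hRle : Rs.Pairwise (fun a b => a ≤ b) := PySem.List.sorted_pairwise DR (fun x => x)
  have hLp : L.Pairwise (· < ·) := (hLle.and hLnd).imp (fun h => lt_of_le_of_ne h.1 h.2)
  have hRp : Rs.Pairwise (· < ·) := (hRle.and hRnd).imp (fun h => lt_of_le_of_ne h.1 h.2)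
  have hdis : ∀ x ∈ L, x ∉ Rs := by
    intro x hx hx'
    have h1 := (PySem.Set.mem_diff _ _ _).mp (hLperm.mem_iff.mp hx)
    have h2 := (PySem.Set.mem_diff _ _ _).mp (hRperm.mem_iff.mp hx')
    exact h1.2 h2.1
  have key : pvALoop L DR 0 = pvTpGo L Rs 0 0 0 := by
    rw [show pvALoop L DR 0 = pvCount L DR from rfl,
      pvCount_perm L DR Rs hRperm.symm hDRnd, pvMain L Rs hLp hRp hdis,
      pvTpGo_eq]
    simp
  show n - (L.length : Int) + pvALoop L DR 0 = n - (L.length : Int) + pvTpGo L Rs 0 0 0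
  rw [key]
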